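-- pv_equiv track=rewrite | github.com/jiazj-jiazj/Codec_Gen | valle/data/dataset_infer.py | del_count_elements
-- ===== SOURCE A (Python) =====
-- from heapq import heapify, heappop, heappush
--
-- def del_count_elements(sequence, total_to_subtract):
--     # 创建一个索引堆，以便知道哪个元素被减去
--     index_heap = [(-val, i) for i, val in enumerate(sequence)]
--     heapify(index_heap)  # 建立最大堆
--
--     # 从最大的数字开始逐一减去1
--     for _ in range(total_to_subtract):
--         if not index_heap:
--             break  # 如果堆为空，则停止
--         # 弹出最大的数字
--         max_val, max_index = heappop(index_heap)
--         if sequence[max_index] > 0:  # 如果该数字已经是0，则不再减去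
--             sequence[max_index] -= 1  # 减去1
--         if sequence[max_index] > 0:  # 如果减去1后大于0，则放回堆中
--             heappush(index_heap, (-sequence[max_index], max_index))
--
--     return sequence
-- ===== SOURCE B (Python) =====
-- def del_count_elements(sequence, total_to_subtract):
--     # Computes the final "water level" by binary search instead of T single heap pops.
--     # Same in-place mutation of `sequence` as the original; returns it.
--     T = max(total_to_subtract, 0)
--
--     def cost(level):
--         # total number of unit subtractions needed to cap every element at `level`
--         return sum(v - level for v in sequence if v > level)
--
--     if T >= cost(0):
--         for i, v in enumerate(sequence):
--             if v > 0:
--                 sequence[i] = 0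
--         return sequence
--
--     # smallest L in [1, max(sequence)] with cost(L) <= T
--     lo, hi = 1, max(sequence)
--     while lo < hi:
--         mid = (lo + hi) // 2
--         if cost(mid) <= T:
--             hi = mid
--         else:
--             lo = mid + 1
--     L = lo
--     r = T - cost(L)  # leftover single subtractions, go to lowest indices with v >= L
--     for i, v in enumerate(sequence):
--         if v >= L:
--             if r > 0:
--                 sequence[i] = L - 1
--                 r -= 1
--             else:
--                 sequence[i] = L
--     return sequence
-- ===== Notes on version B (the rewrite author's own statement) =====
-- stated objective: alternative
-- what changed: A pops a max-heap once per unit of budget; B instead binary-searches the final water level L via a cost function, then rewrites the list in one pass, giving the leftover budget to the lowest-index elements with value >= L.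
import Mathlib
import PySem

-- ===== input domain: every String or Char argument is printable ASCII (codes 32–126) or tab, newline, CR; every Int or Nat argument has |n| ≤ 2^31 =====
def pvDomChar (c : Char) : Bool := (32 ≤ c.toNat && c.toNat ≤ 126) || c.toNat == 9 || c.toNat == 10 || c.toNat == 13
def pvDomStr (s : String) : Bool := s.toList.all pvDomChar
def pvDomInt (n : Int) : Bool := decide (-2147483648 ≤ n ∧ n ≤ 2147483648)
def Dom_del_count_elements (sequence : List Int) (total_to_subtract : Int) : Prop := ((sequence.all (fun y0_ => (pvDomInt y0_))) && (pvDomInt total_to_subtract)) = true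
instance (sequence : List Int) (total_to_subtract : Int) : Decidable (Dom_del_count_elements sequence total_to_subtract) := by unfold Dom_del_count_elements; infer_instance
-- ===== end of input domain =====

-- B replaces A's total_to_subtract single heap pops by a binary search for the final
-- "water level" plus two linear passes (objective: alternative algorithm).  Both A and B
-- mutate the Python list in place to the same final contents; the theorems are about the
-- return value.

-- ===== PORT A =====
-- heapq is ported semantically: the heap is kept as a plain list of pairs; heapify is the
-- identity on contents, heappop removes the lexicographically least pair (exact: heapq pops
-- the minimum, and all pairs here are distinct since indices are distinct), heappush appends.
def pvLexLe (a b : Int × Int) : Bool := a.1 < b.1 || (a.1 == b.1 && a.2 ≤ b.2)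

def pvPopMin : List (Int × Int) → Option ((Int × Int) × List (Int × Int))
  | [] => none
  | x :: xs =>
    match pvPopMin xs with
    | none => some (x, [])
    | some (m, rest) => if pvLexLe x m then some (x, xs) else some (m, x :: rest)

-- the for-loop over range(total_to_subtract), with `sequence` and the heap as state
def pvLoopA : Nat → List Int → List (Int × Int) → List Int
  | 0, seq, _ => seq
  | n + 1, seq, heap =>
    match pvPopMin heap with
    | none => seq                                  -- `break` on an empty heap
    | some ((_, mi), rest) =>
      match PySem.List.pyGet? seq mi with
      | none => seq                                -- unreachable: heap indices are in range
      | some v =>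
        let seq' := if 0 < v then PySem.List.pySetD seq mi (v - 1) else seq
        match PySem.List.pyGet? seq' mi with
        | none => seq'                             -- unreachable likewise
        | some v2 =>
          if 0 < v2 then pvLoopA n seq' (rest ++ [(-v2, mi)])
          else pvLoopA n seq' rest

def del_count_elements (sequence : List Int) (total_to_subtract : Int) : List Int :=
  pvLoopA total_to_subtract.toNat sequence
    ((PySem.List.enumerate sequence).map (fun p => (-p.2, p.1)))

-- ===== PORT B =====
-- cost(level) = sum(v - level for v in sequence if v > level)
def pvCost (sequence : List Int) (level : Int) : Int :=
  sequence.foldl (fun acc v => if level < v then acc + (v - level) else acc) 0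

-- while lo < hi: mid = (lo+hi)//2; if cost(mid) <= T: hi = mid else lo = mid+1
def pvSearch (sequence : List Int) (T lo hi : Int) : Int :=
  if h : lo < hi then
    let mid := PySem.Int.floordiv (lo + hi) 2
    if pvCost sequence mid ≤ T then pvSearch sequence T lo mid
    else pvSearch sequence T (mid + 1) hi
  else lo
termination_by (hi - lo).toNat
decreasing_by
  · have := PySem.Int.floordiv_two_mid_bounds (le_of_lt h)
    have h2 : PySem.Int.floordiv (lo + hi) 2 < hi := by
      rw [PySem.Int.floordiv_lt_iff_lt_mul (by omega : (0:Int) < 2)]; omega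
    omega
  · have := PySem.Int.floordiv_two_mid_bounds (le_of_lt h)
    omega

-- final pass: if v >= L: assign L-1 while r > 0 else L
def pvAssign (L : Int) : Int → List Int → List Int
  | _, [] => []
  | r, v :: vs =>
    if L ≤ v then
      if 0 < r then (L - 1) :: pvAssign L (r - 1) vs
      else L :: pvAssign L r vs
    else v :: pvAssign L r vs

-- the T >= cost(0) pass: every positive element becomes 0
def pvZeroPos : List Int → List Int
  | [] => []
  | v :: vs => (if 0 < v then 0 else v) :: pvZeroPos vs

def del_count_elements_alt (sequence : List Int) (total_to_subtract : Int) : List Int :=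
  let T := max total_to_subtract 0
  if pvCost sequence 0 ≤ T then pvZeroPos sequence
  else
    match PySem.List.max? sequence (fun x => x) with
    | none => sequence                             -- unreachable: cost(0) > T ≥ 0 needs a positive element
    | some m =>
      let L := pvSearch sequence T 1 m
      let r := T - pvCost sequence L
      pvAssign L r sequence

-- ===== PRECONDITION & SPEC =====
def Spec_del_count_elements (sequence : List Int) (total_to_subtract : Int) (out : List Int) : Prop := out = del_count_elements_alt sequence total_to_subtract
instance (sequence : List Int) (total_to_subtract : Int) (out : List Int) : Decidable (Spec_del_count_elements sequence total_to_subtract out) := by unfold Spec_del_count_elements; infer_instance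

-- ===== CLAIM (what is proved, stated in full; the proofs are below) =====
def Claim_equal_del_count_elements : Prop := ∀ (sequence : List Int) (total_to_subtract : Int), Dom_del_count_elements sequence total_to_subtract → Spec_del_count_elements sequence total_to_subtract (del_count_elements sequence total_to_subtract)

-- ===== LEMMAS AND PROOFS =====

-- ---- proof-side reference step: decrement the first occurrence of the maximum if positive ----
def pvDecFirst (m : Int) : List Int → List Int
  | [] => []
  | v :: vs => if v = m then (v - 1) :: vs else v :: pvDecFirst m vs

def pvStep (seq : List Int) : List Int :=
  match PySem.List.max? seq (fun x => x) with
  | none => seq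
  | some m => if 0 < m then pvDecFirst m seq else seq

-- body of B after T has been computed
def pvB (sequence : List Int) (T : Int) : List Int :=
  if pvCost sequence 0 ≤ T then pvZeroPos sequence
  else
    match PySem.List.max? sequence (fun x => x) with
    | none => sequence
    | some m =>
      let L := pvSearch sequence T 1 m
      let r := T - pvCost sequence L
      pvAssign L r sequence

def pvCount (L : Int) (seq : List Int) : Int := ((seq.countP (fun v => decide (L ≤ v))) : Int)


-- ---- cost / count facts ----
lemma pvCost_eq_sum (seq : List Int) (l : Int) :
    pvCost seq l = (seq.map (fun v => if l < v then v - l else 0)).sum := by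
  unfold pvCost
  rw [show (fun (acc v : Int) => if l < v then acc + (v - l) else acc)
        = fun (acc v : Int) => acc + (if l < v then v - l else 0) from by
      funext acc v; split <;> simp]
  rw [PySem.List.foldl_add]; simp

lemma pvCost_nil (l : Int) : pvCost [] l = 0 := rfl

lemma pvCost_cons (v : Int) (vs : List Int) (l : Int) :
    pvCost (v :: vs) l = (if l < v then v - l else 0) + pvCost vs l := by
  simp [pvCost_eq_sum]

lemma pvCost_nonneg (seq : List Int) (l : Int) : 0 ≤ pvCost seq l := by
  induction seq with
  | nil => simp [pvCost_nil]
  | cons v vs ih => rw [pvCost_cons]; split <;> omega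

lemma pvCount_nil (L : Int) : pvCount L [] = 0 := rfl

lemma pvCount_cons (L v : Int) (vs : List Int) :
    pvCount L (v :: vs) = (if L ≤ v then 1 else 0) + pvCount L vs := by
  simp only [pvCount, List.countP_cons, decide_eq_true_eq]
  push_cast
  split_ifs <;> omega

lemma pvCount_nonneg (L : Int) (seq : List Int) : 0 ≤ pvCount L seq := by
  simp [pvCount]

lemma pvCost_pred (seq : List Int) (L : Int) :
    pvCost seq (L - 1) = pvCost seq L + pvCount L seq := by
  induction seq with
  | nil => simp [pvCost_nil, pvCount_nil]
  | cons v vs ih =>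
    rw [pvCost_cons, pvCost_cons, pvCount_cons]
    have : (if L - 1 < v then v - (L - 1) else 0)
        = (if L < v then v - L else 0) + (if L ≤ v then 1 else 0) := by
      split_ifs <;> omega
    omega

lemma pvCost_antitone (seq : List Int) {a b : Int} (h : a ≤ b) :
    pvCost seq b ≤ pvCost seq a := by
  induction seq with
  | nil => simp [pvCost_nil]
  | cons v vs ih => rw [pvCost_cons, pvCost_cons]; split_ifs <;> omega

lemma pvCost_eq_zero_iff (seq : List Int) (l : Int) :
    pvCost seq l = 0 ↔ ∀ v ∈ seq, v ≤ l := by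
  induction seq with
  | nil => simp [pvCost_nil]
  | cons v vs ih =>
    rw [pvCost_cons]
    have h1 := pvCost_nonneg vs l
    constructor
    · intro h x hx
      rcases List.mem_cons.mp hx with rfl | hx'
      · split_ifs at h <;> omega
      · have : pvCost vs l = 0 := by split_ifs at h <;> omega
        exact (ih.mp this) x hx'
    · intro h
      have hv : v ≤ l := h v (List.mem_cons_self ..)
      have : pvCost vs l = 0 := ih.mpr (fun x hx => h x (List.mem_cons_of_mem _ hx))
      split_ifs <;> omega

lemma pvCount_antitone (seq : List Int) {a b : Int} (h : a ≤ b) :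
    pvCount b seq ≤ pvCount a seq := by
  induction seq with
  | nil => simp [pvCount_nil]
  | cons v vs ih => rw [pvCount_cons, pvCount_cons]; split_ifs <;> omega

lemma pvCount_pos_of_mem {seq : List Int} {v L : Int} (hv : v ∈ seq) (h : L ≤ v) :
    0 < pvCount L seq := by
  induction seq with
  | nil => cases hv
  | cons w ws ih =>
    rw [pvCount_cons]
    have hnn := pvCount_nonneg L ws
    rcases List.mem_cons.mp hv with rfl | hv'
    · split_ifs <;> omega
    · have := ih hv'; split_ifs <;> omega

lemma pvCost_pos_exists {seq : List Int} {l : Int} (h : 0 < pvCost seq l) :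
    ∃ v ∈ seq, l < v := by
  by_contra hc
  push_neg at hc
  have : pvCost seq l = 0 := (pvCost_eq_zero_iff seq l).mpr hc
  omega

-- ---- assign / zeroPos / step facts ----
lemma pvAssign_le (L x : Int) :
    ∀ (seq : List Int) (r : Int), x ∈ pvAssign L r seq → x ≤ L := by
  intro seq
  induction seq with
  | nil => intro r h; simp [pvAssign] at h
  | cons v vs ih =>
    intro r h
    by_cases hv : L ≤ v
    · by_cases hr : 0 < r
      · simp only [pvAssign, if_pos hv, if_pos hr] at h
        rcases List.mem_cons.mp h with rfl | h' <;> [omega; exact ih _ h']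
      · simp only [pvAssign, if_pos hv, if_neg hr] at h
        rcases List.mem_cons.mp h with rfl | h' <;> [omega; exact ih _ h']
    · simp only [pvAssign, if_neg hv] at h
      rcases List.mem_cons.mp h with rfl | h' <;> [omega; exact ih _ h']

lemma pvAssign_mem (L : Int) :
    ∀ (seq : List Int) (r : Int), 0 ≤ r → r < pvCount L seq → L ∈ pvAssign L r seq := by
  intro seq
  induction seq with
  | nil => intro r h1 h2; rw [pvCount_nil] at h2; omega
  | cons v vs ih =>
    intro r h1 h2
    rw [pvCount_cons] at h2
    by_cases hv : L ≤ v
    · rw [if_pos hv] at h2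
      by_cases hr : 0 < r
      · simp only [pvAssign, if_pos hv, if_pos hr]
        exact List.mem_cons_of_mem _ (ih (r - 1) (by omega) (by omega))
      · simp only [pvAssign, if_pos hv, if_neg hr]
        exact List.mem_cons_self ..
    · rw [if_neg hv] at h2
      simp only [pvAssign, if_neg hv]
      exact List.mem_cons_of_mem _ (ih r h1 (by omega))

lemma pvDecFirst_pvAssign (L : Int) (hL : 1 ≤ L) :
    ∀ (seq : List Int) (r : Int), 0 ≤ r → r < pvCount L seq →
      pvDecFirst L (pvAssign L r seq) = pvAssign L (r + 1) seq := by
  intro seq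
  induction seq with
  | nil => intro r h1 h2; rw [pvCount_nil] at h2; omega
  | cons v vs ih =>
    intro r h1 h2
    rw [pvCount_cons] at h2
    by_cases hv : L ≤ v
    · rw [if_pos hv] at h2
      by_cases hr : 0 < r
      · simp only [pvAssign, if_pos hv, if_pos hr, pvDecFirst,
          if_neg (by omega : ¬ (L - 1 = L)), if_pos (by omega : (0:Int) < r + 1)]
        rw [ih (r - 1) (by omega) (by omega)]
        norm_num
      · have hr0 : r = 0 := by omega
        subst hr0
        simp only [pvAssign, if_pos hv, if_neg hr, pvDecFirst, if_pos rfl,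
          if_pos (by omega : (0:Int) < 0 + 1)]
        norm_num
    · rw [if_neg hv] at h2
      simp only [pvAssign, if_neg hv, pvDecFirst, if_neg (by omega : ¬ (v = L))]
      rw [ih r h1 (by omega)]

lemma pvStep_pvAssign (L : Int) (seq : List Int) (r : Int)
    (hL : 1 ≤ L) (h1 : 0 ≤ r) (h2 : r < pvCount L seq) :
    pvStep (pvAssign L r seq) = pvAssign L (r + 1) seq := by
  have hmem : L ∈ pvAssign L r seq := pvAssign_mem L seq r h1 h2
  unfold pvStep
  cases hm : PySem.List.max? (pvAssign L r seq) (fun x => x) with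
  | none =>
    rw [PySem.List.max?_eq_none_iff] at hm
    rw [hm] at hmem; cases hmem
  | some m =>
    have h3 : m ≤ L := pvAssign_le L m seq r (PySem.List.max?_mem hm)
    have h4 : L ≤ m := PySem.List.max?_isMax hm L hmem
    have hmL : m = L := by omega
    subst hmL
    dsimp only
    rw [if_pos (by omega : (0:Int) < m)]
    exact pvDecFirst_pvAssign m hL seq r h1 h2

lemma pvAssign_count (L : Int) (hL : 1 ≤ L) :
    ∀ seq : List Int, pvAssign L (pvCount L seq) seq = pvAssign (L - 1) 0 seq := by
  intro seq
  induction seq with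
  | nil => simp [pvAssign]
  | cons v vs ih =>
    rw [pvCount_cons]
    by_cases hv : L ≤ v
    · rw [if_pos hv]
      have hc := pvCount_nonneg L vs
      simp only [pvAssign, if_pos hv, if_pos (show (0:Int) < 1 + pvCount L vs by omega),
        if_pos (show L - 1 ≤ v by omega), if_neg (show ¬ (0:Int) < 0 from by omega)]
      rw [show 1 + pvCount L vs - 1 = pvCount L vs by ring, ih]
    · rw [if_neg hv]
      by_cases hv' : L - 1 ≤ v
      · have hv2 : v = L - 1 := by omega
        subst hv2
        simp [pvAssign, hv, ih]
      · simp only [pvAssign, if_neg hv, if_neg hv', zero_add, ih]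

lemma pvAssign_id (L : Int) :
    ∀ seq : List Int, (∀ v ∈ seq, v ≤ L) → pvAssign L 0 seq = seq := by
  intro seq
  induction seq with
  | nil => simp [pvAssign]
  | cons v vs ih =>
    intro h
    have hv := h v (List.mem_cons_self ..)
    have hvs : ∀ w ∈ vs, w ≤ L := fun w hw => h w (List.mem_cons_of_mem _ hw)
    by_cases hLv : L ≤ v
    · simp only [pvAssign, if_pos hLv, if_neg (show ¬ (0:Int) < 0 from by omega), ih hvs]
      have : L = v := by omega
      rw [this]
    · simp only [pvAssign, if_neg hLv, ih hvs]

lemma pvZeroPos_eq_assign : ∀ seq : List Int, pvAssign 0 0 seq = pvZeroPos seq := by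
  intro seq
  induction seq with
  | nil => simp [pvAssign, pvZeroPos]
  | cons v vs ih =>
    by_cases hv : (0:Int) ≤ v
    · simp only [pvAssign, if_pos hv, if_neg (show ¬ (0:Int) < 0 from by omega), ih, pvZeroPos]
      congr 1
      split <;> omega
    · simp only [pvAssign, if_neg hv, ih, pvZeroPos]
      congr 1
      rw [if_neg (by omega : ¬ (0:Int) < v)]

lemma mem_pvZeroPos_nonpos : ∀ (seq : List Int) (x : Int), x ∈ pvZeroPos seq → x ≤ 0 := by
  intro seq
  induction seq with
  | nil => intro x h; simp [pvZeroPos] at h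
  | cons v vs ih =>
    intro x h
    simp only [pvZeroPos] at h
    rcases List.mem_cons.mp h with rfl | h'
    · split <;> omega
    · exact ih x h'

lemma pvZeroPos_of_nonpos : ∀ seq : List Int, (∀ v ∈ seq, v ≤ 0) → pvZeroPos seq = seq := by
  intro seq
  induction seq with
  | nil => simp [pvZeroPos]
  | cons v vs ih =>
    intro h
    have hv := h v (List.mem_cons_self ..)
    simp only [pvZeroPos, if_neg (by omega : ¬ (0:Int) < v),
      ih (fun w hw => h w (List.mem_cons_of_mem _ hw))]

lemma pvStep_id {seq : List Int} (h : ∀ x ∈ seq, x ≤ 0) : pvStep seq = seq := by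
  unfold pvStep
  cases hm : PySem.List.max? seq (fun x => x) with
  | none => rfl
  | some m =>
    have : m ≤ 0 := h m (PySem.List.max?_mem hm)
    dsimp only
    rw [if_neg (by omega : ¬ (0:Int) < m)]


-- ---- the binary search finds THE level with cost(L) <= T < cost(L-1) ----
lemma pvSearch_spec (seq : List Int) (T : Int) :
    ∀ (n : Nat) (lo hi : Int), (hi - lo).toNat = n → lo ≤ hi →
      pvCost seq hi ≤ T → T < pvCost seq (lo - 1) →
      lo ≤ pvSearch seq T lo hi ∧ pvSearch seq T lo hi ≤ hi ∧
        pvCost seq (pvSearch seq T lo hi) ≤ T ∧ T < pvCost seq (pvSearch seq T lo hi - 1) := by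
  intro n
  induction n using Nat.strong_induction_on with
  | _ n ih =>
    intro lo hi hn hle hhi hlo
    rw [pvSearch]
    by_cases h : lo < hi
    · rw [dif_pos h]
      have hmid := PySem.Int.floordiv_two_mid_bounds (le_of_lt h)
      have hmidlt : PySem.Int.floordiv (lo + hi) 2 < hi := by
        rw [PySem.Int.floordiv_lt_iff_lt_mul (by omega : (0:Int) < 2)]; omega
      set mid := PySem.Int.floordiv (lo + hi) 2 with hmiddef
      by_cases hc : pvCost seq mid ≤ T
      · rw [if_pos hc]
        exact (ih (mid - lo).toNat (by omega) lo mid rfl (by omega) hc hlo).imp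
          id (fun h => ⟨by omega, h.2⟩)
      · rw [if_neg hc]
        have : T < pvCost seq (mid + 1 - 1) := by simpa using by omega
        exact (ih (hi - (mid + 1)).toNat (by omega) (mid + 1) hi rfl (by omega) hhi this).imp
          (fun h => by omega) id
    · rw [dif_neg h]
      have : lo = hi := by omega
      subst this
      exact ⟨le_refl _, le_refl _, hhi, hlo⟩

lemma pvLevel_unique (seq : List Int) (T : Int) {L1 L2 : Int}
    (h1 : pvCost seq L1 ≤ T ∧ T < pvCost seq (L1 - 1))
    (h2 : pvCost seq L2 ≤ T ∧ T < pvCost seq (L2 - 1)) : L1 = L2 := by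
  rcases lt_trichotomy L1 L2 with h | h | h
  · have := pvCost_antitone seq (show L1 ≤ L2 - 1 by omega)
    omega
  · exact h
  · have := pvCost_antitone seq (show L2 ≤ L1 - 1 by omega)
    omega

-- the else-branch of B, characterized
lemma pvB_else (seq : List Int) (T : Int) (hT : 0 ≤ T) (h0 : ¬ pvCost seq 0 ≤ T) :
    ∃ L, (1 ≤ L ∧ pvCost seq L ≤ T ∧ T < pvCost seq (L - 1)) ∧
      pvB seq T = pvAssign L (T - pvCost seq L) seq := by
  have hne : seq ≠ [] := by
    intro h; rw [h] at h0; exact h0 (by simp [pvCost_nil]; omega)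
  cases hmax : PySem.List.max? seq (fun x => x) with
  | none => exact absurd ((PySem.List.max?_eq_none_iff _ _).mp hmax) hne
  | some m =>
    have hismax : ∀ y ∈ seq, y ≤ m := fun y hy => PySem.List.max?_isMax hmax y hy
    have hm1 : 1 ≤ m := by
      obtain ⟨v, hv, hvpos⟩ := pvCost_pos_exists (show 0 < pvCost seq 0 by omega)
      have := hismax v hv; omega
    have hcm : pvCost seq m ≤ T := by
      have : pvCost seq m = 0 := (pvCost_eq_zero_iff seq m).mpr hismax
      omega
    have hspec := pvSearch_spec seq T (m - 1).toNat 1 m (by omega) hm1 hcm (by simpa using h0)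
    refine ⟨pvSearch seq T 1 m, ⟨hspec.1, hspec.2.2.1, hspec.2.2.2⟩, ?_⟩
    rw [pvB, if_neg h0, hmax]

lemma pvB_zero (seq : List Int) : pvB seq 0 = seq := by
  by_cases h0 : pvCost seq 0 ≤ 0
  · have : pvCost seq 0 = 0 := le_antisymm h0 (pvCost_nonneg seq 0)
    rw [pvB, if_pos h0]
    exact pvZeroPos_of_nonpos seq (by
      intro v hv
      exact (pvCost_eq_zero_iff seq 0).mp this v hv)
  · obtain ⟨L, ⟨hL1, hL2, hL3⟩, hB⟩ := pvB_else seq 0 (le_refl 0) h0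
    have hz : pvCost seq L = 0 := le_antisymm hL2 (pvCost_nonneg seq L)
    rw [hB, hz, sub_zero]
    exact pvAssign_id L seq ((pvCost_eq_zero_iff seq L).mp hz)

-- ---- one greedy step advances B's closed form by one unit of budget ----
lemma pvStepB (seq : List Int) (T : Int) (hT : 0 ≤ T) :
    pvStep (pvB seq T) = pvB seq (T + 1) := by
  by_cases h0 : pvCost seq 0 ≤ T
  · rw [pvB, if_pos h0, pvB, if_pos (by omega)]
    exact pvStep_id (mem_pvZeroPos_nonpos seq)
  · obtain ⟨L, ⟨hL1, hL2, hL3⟩, hB⟩ := pvB_else seq T hT h0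
    have hpred : pvCost seq (L - 1) = pvCost seq L + pvCount L seq := pvCost_pred seq L
    set r := T - pvCost seq L with hr
    have hr0 : 0 ≤ r := by omega
    have hrK : r < pvCount L seq := by omega
    rw [hB, pvStep_pvAssign L seq r hL1 hr0 hrK]
    by_cases h1 : pvCost seq 0 ≤ T + 1
    · -- budget exhausts exactly now: everything positive reaches 0
      have hC0 : pvCost seq 0 = T + 1 := by omega
      have hK1pos : 0 < pvCount 1 seq := by
        obtain ⟨v, hv, hvpos⟩ := pvCost_pos_exists (show 0 < pvCost seq 0 by omega)
        exact pvCount_pos_of_mem hv (by omega)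
      have hLone : L = 1 := by
        by_contra hL2'
        have hL2'' : 2 ≤ L := by omega
        have hc1 : pvCost seq 0 = pvCost seq 1 + pvCount 1 seq := by
          have := pvCost_pred seq 1; simpa using this
        have : pvCost seq (L - 1) ≤ pvCost seq 1 :=
          pvCost_antitone seq (by omega)
        omega
      subst hLone
      have hc1 : pvCost seq 0 = pvCost seq 1 + pvCount 1 seq := by
        have := pvCost_pred seq 1; simpa using this
      have hrK1 : r + 1 = pvCount 1 seq := by omega
      rw [hrK1, pvB, if_pos h1, pvAssign_count 1 (le_refl 1) seq]
      simpa using pvZeroPos_eq_assign seq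
    · obtain ⟨L', ⟨hL1', hL2', hL3'⟩, hB'⟩ := pvB_else seq (T + 1) (by omega) h1
      rw [hB']
      by_cases h2 : r + 1 < pvCount L seq
      · have : L' = L := pvLevel_unique seq (T + 1)
          ⟨hL2', hL3'⟩ ⟨by omega, by omega⟩
        subst this
        congr 1
        omega
      · have hrK2 : r + 1 = pvCount L seq := by omega
        have hL2'' : 2 ≤ L := by
          by_contra hc
          have : L = 1 := by omega
          subst this
          have : pvCost seq 0 = pvCost seq 1 + pvCount 1 seq := by
            have := pvCost_pred seq 1; simpa using this
          omega
        have hKmono : pvCount L seq ≤ pvCount (L - 1) seq :=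
          pvCount_antitone seq (by omega)
        have hpred2 : pvCost seq (L - 1 - 1) = pvCost seq (L - 1) + pvCount (L - 1) seq :=
          pvCost_pred seq (L - 1)
        have : L' = L - 1 := pvLevel_unique seq (T + 1)
          ⟨hL2', hL3'⟩ ⟨by omega, by omega⟩
        subst this
        have hr' : T + 1 - pvCost seq (L - 1) = 0 := by omega
        rw [hr', hrK2]
        exact pvAssign_count L (by omega) seq

-- ---- the iterated greedy step IS B's closed form ----
lemma pvIter_eq_pvB : ∀ (n : Nat) (seq : List Int), pvStep^[n] seq = pvB seq (n : Int) := by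
  intro n
  induction n with
  | zero => intro seq; simp [pvB_zero]
  | succ n ih =>
    intro seq
    rw [Function.iterate_succ_apply', ih seq, pvStepB seq (n : Int) (by positivity)]
    norm_num


-- ---- the lexicographic pop order of the heap ----
lemma pvLexLe_iff (a b : Int × Int) :
    pvLexLe a b = true ↔ (a.1 < b.1 ∨ (a.1 = b.1 ∧ a.2 ≤ b.2)) := by
  simp [pvLexLe]

lemma pvLexLe_refl (a : Int × Int) : pvLexLe a a = true := by
  rw [pvLexLe_iff]; omega

lemma pvLexLe_trans (a b c : Int × Int) (h1 : pvLexLe a b = true) (h2 : pvLexLe b c = true) :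
    pvLexLe a c = true := by
  rw [pvLexLe_iff] at h1 h2 ⊢; omega

lemma pvLexLe_of_not {a b : Int × Int} (h : ¬ pvLexLe a b = true) : pvLexLe b a = true := by
  rw [pvLexLe_iff] at h ⊢; omega

lemma pvPopMin_eq_none : ∀ h : List (Int × Int), pvPopMin h = none ↔ h = [] := by
  intro h
  cases h with
  | nil => simp [pvPopMin]
  | cons x xs =>
    simp only [pvPopMin]
    cases hxs : pvPopMin xs <;> simp_all
    split <;> simp

lemma pvPopMin_spec : ∀ (h : List (Int × Int)) (m : Int × Int) (rest : List (Int × Int)),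
    pvPopMin h = some (m, rest) →
    m ∈ h ∧ (∀ x ∈ h, pvLexLe m x = true) ∧ rest.Perm (h.erase m) := by
  intro h
  induction h with
  | nil => intro m rest hm; simp [pvPopMin] at hm
  | cons x xs ih =>
    intro m rest hm
    simp only [pvPopMin] at hm
    cases hxs : pvPopMin xs with
    | none =>
      rw [hxs] at hm
      have hnil : xs = [] := (pvPopMin_eq_none xs).mp hxs
      subst hnil
      obtain ⟨rfl, rfl⟩ := Prod.mk.inj (Option.some.inj hm)
      refine ⟨List.mem_cons_self .., ?_, ?_⟩
      · intro y hy
        rcases List.mem_cons.mp hy with rfl | hy'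
        · exact pvLexLe_refl y
        · simp at hy'
      · simp
    | some p =>
      obtain ⟨m', rest'⟩ := p
      rw [hxs] at hm
      obtain ⟨hmem', hmin', hperm'⟩ := ih m' rest' hxs
      dsimp only at hm
      by_cases hle : pvLexLe x m' = true
      · rw [if_pos hle] at hm
        obtain ⟨rfl, rfl⟩ := Prod.mk.inj (Option.some.inj hm)
        refine ⟨List.mem_cons_self .., ?_, ?_⟩
        · intro y hy
          rcases List.mem_cons.mp hy with rfl | hy'
          · exact pvLexLe_refl y
          · exact pvLexLe_trans _ _ _ hle (hmin' y hy')
        · rw [List.erase_cons_head]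
      · rw [if_neg hle] at hm
        obtain ⟨rfl, rfl⟩ := Prod.mk.inj (Option.some.inj hm)
        have hxm : x ≠ m' := fun he => hle (he ▸ pvLexLe_refl x)
        refine ⟨List.mem_cons_of_mem _ hmem', ?_, ?_⟩
        · intro y hy
          rcases List.mem_cons.mp hy with rfl | hy'
          · exact pvLexLe_of_not hle
          · exact hmin' y hy'
        · rw [List.erase_cons_tail (by simp [hxm])]
          exact hperm'.cons x

-- decrementing the first occurrence of the maximum is a `set` at its first index
lemma pvDecFirst_eq_set (M : Int) :
    ∀ (seq : List Int) (k : Nat) (hk : k < seq.length), seq[k] = M →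
      (∀ j : Nat, (hj : j < seq.length) → j < k → seq[j] ≠ M) →
      pvDecFirst M seq = seq.set k (M - 1) := by
  intro seq
  induction seq with
  | nil => intro k hk; simp at hk
  | cons v vs ih =>
    intro k hk hkM hfirst
    cases k with
    | zero =>
      simp at hkM
      simp [pvDecFirst, hkM]
    | succ k' =>
      have hvne : v ≠ M := by
        have := hfirst 0 (by simp) (by omega)
        simpa using this
      simp only [pvDecFirst, if_neg hvne, List.set_cons_succ]
      congr 1
      exact ih k' (by simpa using hk) (by simpa using hkM)
        (fun j hj hjk => by
          have := hfirst (j + 1) (by simpa using hj) (by omega)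
          simpa using this)

-- ---- the heap loop of A is the iterated greedy step ----
lemma pvLoopA_eq_iter :
    ∀ (n : Nat) (seq : List Int) (heap : List (Int × Int)) (idxs : List Int),
      heap.Perm (idxs.map (fun i => (-(PySem.List.pyGetD seq i 0), i))) →
      idxs.Nodup →
      (∀ i ∈ idxs, 0 ≤ i ∧ i < (seq.length : Int)) →
      (∀ k : Nat, (hk : k < seq.length) → 0 < seq[k] → ((k : Int) ∈ idxs)) →
      pvLoopA n seq heap = pvStep^[n] seq := by
  intro n
  induction n with
  | zero => intro seq heap idxs _ _ _ _; rfl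
  | succ n ih =>
    intro seq heap idxs hperm hnd hbound hpos
    cases hp : pvPopMin heap with
    | none =>
      have hnil : heap = [] := (pvPopMin_eq_none heap).mp hp
      subst hnil
      have hidxs : idxs = [] :=
        List.map_eq_nil_iff.mp (List.Perm.eq_nil hperm.symm)
      subst hidxs
      have hall : ∀ x ∈ seq, x ≤ 0 := by
        intro x hx
        obtain ⟨k, hk, rfl⟩ := List.mem_iff_getElem.mp hx
        by_contra hc
        have := hpos k hk (by omega)
        simp at this
      rw [pvLoopA, hp, Function.iterate_fixed (pvStep_id hall)]
    | some val =>
      obtain ⟨⟨mv, mi⟩, rest⟩ := val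
      obtain ⟨hmem, hmin, hpermrest⟩ := pvPopMin_spec heap (mv, mi) rest hp
      obtain ⟨i0, hi0, heq⟩ := List.mem_map.mp (hperm.mem_iff.mp hmem)
      obtain ⟨heq1, heq2⟩ := Prod.mk.inj heq
      subst heq1
      have heq3 : mi = i0 := heq2.symm
      subst heq3
      have finj : Function.Injective (fun i : Int => (-(PySem.List.pyGetD seq i 0), i)) := by
        intro a b hab
        exact (Prod.mk.inj hab).2
      obtain ⟨hmi0, hmil⟩ := hbound mi hi0
      have hkml : mi.toNat < seq.length := by omega
      have hMval : PySem.List.pyGetD seq mi 0 = seq[mi.toNat] :=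
        PySem.List.pyGetD_eq_getElem _ _ hmi0 hmil
      set M := PySem.List.pyGetD seq mi 0 with hMdef
      have hub : ∀ j ∈ idxs, PySem.List.pyGetD seq j 0 ≤ M := by
        intro j hj
        have hmj := hmin _ (hperm.mem_iff.mpr (List.mem_map.mpr ⟨j, hj, rfl⟩))
        rw [pvLexLe_iff] at hmj
        simp only at hmj
        omega
      have hfirst : ∀ j ∈ idxs, PySem.List.pyGetD seq j 0 = M → mi ≤ j := by
        intro j hj hjM
        have hmj := hmin _ (hperm.mem_iff.mpr (List.mem_map.mpr ⟨j, hj, rfl⟩))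
        rw [pvLexLe_iff] at hmj
        simp only at hmj
        omega
      have hallub : ∀ x ∈ seq, x ≤ max M 0 := by
        intro x hx
        obtain ⟨k, hk, rfl⟩ := List.mem_iff_getElem.mp hx
        by_cases hpk : 0 < seq[k]
        · have hkidx := hpos k hk hpk
          have := hub _ hkidx
          rw [PySem.List.pyGetD_eq_getElem _ _ (by omega) (by exact_mod_cast hk)] at this
          simp only [Int.toNat_natCast] at this
          omega
        · omega
      have hget : PySem.List.pyGet? seq mi = some M := by
        rw [PySem.List.pyGet?_eq_some_getElem _ hmi0 hmil, ← hMval]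
      rw [pvLoopA, hp]
      dsimp only
      rw [hget]
      dsimp only
      by_cases hM : 0 < M
      · -- the decremented element really is the first maximum of seq
        have hmax : PySem.List.max? seq (fun x => x) = some M := by
          cases hq : PySem.List.max? seq (fun x => x) with
          | none =>
            have : seq = [] := (PySem.List.max?_eq_none_iff _ _).mp hq
            rw [this] at hkml; simp at hkml
          | some m2 =>
            have h1 : m2 ≤ max M 0 := hallub m2 (PySem.List.max?_mem hq)
            have h2 : M ≤ m2 := PySem.List.max?_isMax hq M (hMval ▸ List.getElem_mem hkml)
            have : m2 = M := by omega
            rw [this]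
        have hstep : pvStep seq = seq.set mi.toNat (M - 1) := by
          unfold pvStep
          rw [hmax]
          dsimp only
          rw [if_pos hM]
          refine pvDecFirst_eq_set M seq mi.toNat hkml hMval.symm ?_
          intro j hj hjk hjM
          have hjpos : 0 < seq[j] := by omega
          have hjidx := hpos j hj hjpos
          have hjget : PySem.List.pyGetD seq (j : Int) 0 = M := by
            rw [PySem.List.pyGetD_eq_getElem _ _ (by omega) (by exact_mod_cast hj)]
            simpa using hjM
          have := hfirst _ hjidx hjget
          omega
        have hsetD : PySem.List.pySetD seq mi (M - 1) = seq.set mi.toNat (M - 1) :=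
          PySem.List.pySetD_of_nonneg _ _ hmi0
        rw [if_pos hM, hsetD]
        have hlen' : (seq.set mi.toNat (M - 1)).length = seq.length := List.length_set ..
        have hget2 : PySem.List.pyGet? (seq.set mi.toNat (M - 1)) mi = some (M - 1) := by
          rw [PySem.List.pyGet?_eq_some_getElem _ hmi0 (by rw [hlen']; exact hmil)]
          congr 1
          exact List.getElem_set_self (by rw [hlen']; exact hkml)
        rw [hget2]
        dsimp only
        -- facts shared by both recursive calls
        have hcongr : ∀ i ∈ idxs.erase mi,
            (-(PySem.List.pyGetD (seq.set mi.toNat (M - 1)) i 0), i)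
              = (-(PySem.List.pyGetD seq i 0), i) := by
          intro i hi
          obtain ⟨hne, hiidx⟩ := (List.Nodup.mem_erase_iff hnd).mp hi
          obtain ⟨hi0b, hilb⟩ := hbound i hiidx
          have : PySem.List.pyGetD (seq.set mi.toNat (M - 1)) i 0
              = PySem.List.pyGetD seq i 0 := by
            rw [PySem.List.pyGetD_eq_getElem _ _ hi0b (by rw [hlen']; exact hilb),
                PySem.List.pyGetD_eq_getElem _ _ hi0b hilb]
            exact List.getElem_set_ne (by omega) _
          rw [this]
        have hrest' : rest.Perm ((idxs.erase mi).map
            (fun i => (-(PySem.List.pyGetD (seq.set mi.toNat (M - 1)) i 0), i))) := by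
          have h1 : rest.Perm ((idxs.map (fun i => (-(PySem.List.pyGetD seq i 0), i))).erase
              (-M, mi)) := hpermrest.trans (hperm.erase _)
          have h2 : ((idxs.erase mi).map (fun i => (-(PySem.List.pyGetD seq i 0), i)))
              = ((idxs.map (fun i => (-(PySem.List.pyGetD seq i 0), i))).erase (-M, mi)) := by
            have := List.map_erase finj (a := mi) idxs
            rw [this, hMdef]
          have h3 : (idxs.erase mi).map (fun i => (-(PySem.List.pyGetD seq i 0), i))
              = (idxs.erase mi).map
                  (fun i => (-(PySem.List.pyGetD (seq.set mi.toNat (M - 1)) i 0), i)) :=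
            (List.map_congr_left hcongr).symm
          refine h1.trans ?_
          rw [← h2, h3]
        have hS'mi : PySem.List.pyGetD (seq.set mi.toNat (M - 1)) mi 0 = M - 1 := by
          rw [PySem.List.pyGetD_eq_getElem _ _ hmi0 (by rw [hlen']; exact hmil)]
          exact List.getElem_set_self (by rw [hlen']; exact hkml)
        have hboundE : ∀ i ∈ idxs.erase mi,
            0 ≤ i ∧ i < ((seq.set mi.toNat (M - 1)).length : Int) := by
          intro i hi
          have := hbound i (List.mem_of_mem_erase hi)
          rw [hlen']
          exact this
        have hiter : pvStep^[n + 1] seq = pvStep^[n] (seq.set mi.toNat (M - 1)) := by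
          rw [Function.iterate_succ_apply, hstep]
        by_cases hM1 : 0 < M - 1
        · rw [if_pos hM1, hiter]
          refine ih (seq.set mi.toNat (M - 1)) (rest ++ [(-(M - 1), mi)])
            (mi :: idxs.erase mi) ?_ ?_ ?_ ?_
          · refine ((hrest'.append_right _).trans (List.perm_append_singleton _ _)).trans ?_
            rw [List.map_cons, hS'mi]
          · exact List.nodup_cons.mpr
              ⟨fun hc => ((List.Nodup.mem_erase_iff hnd).mp hc).1 rfl, hnd.erase _⟩
          · intro i hi
            rcases List.mem_cons.mp hi with rfl | hi'
            · rw [hlen']; exact ⟨hmi0, hmil⟩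
            · exact hboundE i hi'
          · intro k hk hkpos
            by_cases hkk : k = mi.toNat
            · subst hkk
              exact List.mem_cons.mpr (Or.inl (by omega))
            · have hklen : k < seq.length := by rw [← hlen']; exact hk
              have hkval : (seq.set mi.toNat (M - 1))[k] = seq[k] :=
                List.getElem_set_ne (by omega) _
              have hkidx := hpos k hklen (by rw [← hkval]; exact hkpos)
              refine List.mem_cons.mpr (Or.inr ?_)
              exact (List.Nodup.mem_erase_iff hnd).mpr ⟨by omega, hkidx⟩
        · rw [if_neg hM1, hiter]
          refine ih (seq.set mi.toNat (M - 1)) rest (idxs.erase mi) hrest'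
            (hnd.erase _) hboundE ?_
          intro k hk hkpos
          by_cases hkk : k = mi.toNat
          · subst hkk
            have : (seq.set mi.toNat (M - 1))[mi.toNat] = M - 1 :=
              List.getElem_set_self (by rw [hlen']; exact hkml)
            omega
          · have hklen : k < seq.length := by rw [← hlen']; exact hk
            have hkval : (seq.set mi.toNat (M - 1))[k] = seq[k] :=
              List.getElem_set_ne (by omega) _
            have hkidx := hpos k hklen (by rw [← hkval]; exact hkpos)
            exact (List.Nodup.mem_erase_iff hnd).mpr ⟨by omega, hkidx⟩
      · -- popped value not positive: nothing changes, one budget unit is burnt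
        rw [if_neg hM, hget]
        dsimp only
        rw [if_neg hM]
        have hall : ∀ x ∈ seq, x ≤ 0 := by
          intro x hx
          have := hallub x hx
          omega
        have hiter : pvStep^[n + 1] seq = pvStep^[n] seq := by
          rw [Function.iterate_succ_apply, pvStep_id hall]
        rw [hiter]
        refine ih seq rest (idxs.erase mi) ?_ (hnd.erase _)
          (fun i hi => hbound i (List.mem_of_mem_erase hi)) ?_
        · have h1 : rest.Perm ((idxs.map (fun i => (-(PySem.List.pyGetD seq i 0), i))).erase
              (-M, mi)) := hpermrest.trans (hperm.erase _)
          have h2 : ((idxs.erase mi).map (fun i => (-(PySem.List.pyGetD seq i 0), i)))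
              = ((idxs.map (fun i => (-(PySem.List.pyGetD seq i 0), i))).erase (-M, mi)) := by
            have := List.map_erase finj (a := mi) idxs
            rw [this, hMdef]
          refine h1.trans ?_
          rw [← h2]
        · intro k hk hkpos
          have hkidx := hpos k hk hkpos
          have hkne : (k : Int) ≠ mi := by
            intro hc
            have : PySem.List.pyGetD seq (k : Int) 0 = seq[k] := by
              rw [PySem.List.pyGetD_eq_getElem _ _ (by omega) (by exact_mod_cast hk)]
              simp
            rw [hc] at this
            omega
          exact (List.Nodup.mem_erase_iff hnd).mpr ⟨hkne, hkidx⟩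

theorem del_count_elements_spec : Claim_equal_del_count_elements := by
  intro seq t _
  unfold Spec_del_count_elements
  have hmapeq : (PySem.List.enumerate seq).map (fun p => (-p.2, p.1))
      = ((PySem.List.enumerate seq).map (fun p => p.1)).map
          (fun i => (-(PySem.List.pyGetD seq i 0), i)) := by
    rw [List.map_map]
    refine List.map_congr_left ?_
    intro p hp
    obtain ⟨k, hk, rfl⟩ := (PySem.List.mem_enumerate_iff seq 0 p).mp hp
    simp only [Function.comp]
    rw [show ((0:Int) + (k:Int)) = (k:Int) by ring,
        PySem.List.pyGetD_eq_getElem _ _ (by omega) (by exact_mod_cast hk)]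
    simp
  have hnd0 : (((PySem.List.enumerate seq).map (fun p => p.1))).Nodup :=
    List.pairwise_map.mpr ((PySem.List.pairwise_lt_enumerate seq 0).imp (fun h => ne_of_lt h))
  have hbound0 : ∀ i ∈ ((PySem.List.enumerate seq).map (fun p => p.1)),
      0 ≤ i ∧ i < (seq.length : Int) := by
    intro i hi
    obtain ⟨p, hp, rfl⟩ := List.mem_map.mp hi
    obtain ⟨k, hk, rfl⟩ := (PySem.List.mem_enumerate_iff seq 0 p).mp hp
    simp
    omega
  have hpos0 : ∀ k : Nat, (hk : k < seq.length) → 0 < seq[k] →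
      ((k : Int)) ∈ ((PySem.List.enumerate seq).map (fun p => p.1)) := by
    intro k hk _
    refine List.mem_map.mpr ⟨((0:Int) + (k:Int), seq[k]), ?_, by simp⟩
    exact (PySem.List.mem_enumerate_iff seq 0 _).mpr ⟨k, hk, rfl⟩
  have hA : del_count_elements seq t = pvStep^[t.toNat] seq := by
    unfold del_count_elements
    refine pvLoopA_eq_iter t.toNat seq _ _ ?_ hnd0 hbound0 hpos0
    rw [hmapeq]
  have hB : del_count_elements_alt seq t = pvB seq (max t 0) := rfl
  rw [hA, hB, ← Int.toNat_eq_max t]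
  exact pvIter_eq_pvB t.toNat seq
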